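-- pv_equiv track=rewrite | github.com/BrenoFRocha/Federal-University-of-Rio-de-Janeiro | Whole-Numbers-and-Cryptography/Exercises/11.1-Subgroups/program.py | TestG
-- ===== SOURCE A (Python) =====
-- def TestG(lista, n, original):
-- 	i = 0
-- 	result = False
-- 	while(i < len(lista)):
-- 		g = (n*lista[i])%original
-- 		k = 0
-- 		f = False
-- 		while(k < len(lista)):
-- 			if(g == lista[k]):
-- 				f = True
-- 			k += 1
-- 		if(f == False):
-- 			result = True
-- 		i += 1
-- 	return result
-- ===== SOURCE B (Python) =====
-- def _bsearch(a, v):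
--     lo, hi = 0, len(a)
--     while lo < hi:
--         mid = (lo + hi) // 2
--         if a[mid] < v:
--             lo = mid + 1
--         elif v < a[mid]:
--             hi = mid
--         else:
--             return True
--     return False
--
--
-- def TestG(lista, n, original):
--     srt = sorted(set(lista))
--     for x in lista:
--         if not _bsearch(srt, (n * x) % original):
--             return True
--     return False
-- ===== Notes on version B (the rewrite author's own statement) =====
-- stated objective: faster
-- what changed: Sorts the distinct values once and replaces A's inner linear membership scan with a hand-written binary search over the sorted list, returning early at the first escaping image.
import Mathlib
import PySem

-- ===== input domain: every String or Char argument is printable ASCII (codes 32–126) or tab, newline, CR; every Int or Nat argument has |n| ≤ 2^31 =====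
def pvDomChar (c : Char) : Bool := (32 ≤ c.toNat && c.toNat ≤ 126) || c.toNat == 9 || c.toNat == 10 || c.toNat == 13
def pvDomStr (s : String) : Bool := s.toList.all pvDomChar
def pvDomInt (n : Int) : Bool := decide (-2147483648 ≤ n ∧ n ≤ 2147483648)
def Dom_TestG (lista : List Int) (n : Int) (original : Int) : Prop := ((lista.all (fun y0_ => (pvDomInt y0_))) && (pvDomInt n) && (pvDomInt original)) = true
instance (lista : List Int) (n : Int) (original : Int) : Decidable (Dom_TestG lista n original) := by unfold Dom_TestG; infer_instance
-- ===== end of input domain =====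

-- B sorts the distinct values once and replaces A's inner linear membership scan by a binary search, with an early return.

-- ===== PORT A =====
-- outer while loop over i, inner while loop over k as its own fold over the same list
def TestG (lista : List Int) (n : Int) (original : Int) : Bool :=
  lista.foldl
    (fun result x =>
      let g := PySem.Int.mod (n * x) original
      let f := lista.foldl (fun f y => if g = y then true else f) false
      if f = false then true else result)
    false

-- ===== PORT B =====
-- _bsearch's while loop over (lo, hi); a[mid] via getD is exact here since 0 ≤ mid < len a whenever it is read
def bsearchB (a : List Int) (v : Int) (lo hi : Nat) : Bool :=
  if _h : lo < hi then
    let mid := (lo + hi) / 2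
    if a.getD mid 0 < v then bsearchB a v (mid + 1) hi
    else if v < a.getD mid 0 then bsearchB a v lo mid
    else true
  else false
termination_by hi - lo
decreasing_by all_goals omega

-- B's 'for x in lista' loop with its early return
def loopB (srt : List Int) (n : Int) (original : Int) : List Int → Bool
  | [] => false
  | x :: xs =>
    if !bsearchB srt (PySem.Int.mod (n * x) original) 0 srt.length then true
    else loopB srt n original xs

def TestG_alt (lista : List Int) (n : Int) (original : Int) : Bool :=
  let srt := PySem.List.sorted (PySem.Set.ofList lista) (fun x => x) false
  loopB srt n original lista

-- ===== PRECONDITION & SPEC =====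
-- Pre_ excludes exactly the inputs where Python's '%' raises ZeroDivisionError (both A and B raise there).
def Pre_TestG (lista : List Int) (n : Int) (original : Int) : Prop := original ≠ 0 ∨ lista = []
instance (lista : List Int) (n : Int) (original : Int) : Decidable (Pre_TestG lista n original) := by unfold Pre_TestG; infer_instance
def pvWitness_TestG : List Int × Int × Int := ([1, 2, 3], 2, 5)
def Spec_TestG (lista : List Int) (n : Int) (original : Int) (out : Bool) : Prop := out = TestG_alt lista n original
instance (lista : List Int) (n : Int) (original : Int) (out : Bool) : Decidable (Spec_TestG lista n original out) := by unfold Spec_TestG; infer_instance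

-- ===== CLAIM =====
def Claim_equal_TestG : Prop := ∀ (lista : List Int) (n : Int) (original : Int), Dom_TestG lista n original → Pre_TestG lista n original → Spec_TestG lista n original (TestG lista n original)

-- ===== LEMMAS AND PROOFS =====

-- A's inner while loop computes membership of g in the list
theorem innerLoop_eq (g : Int) (l : List Int) (b : Bool) :
    l.foldl (fun f y => if g = y then true else f) b = (b || decide (g ∈ l)) := by
  induction l generalizing b with
  | nil => simp
  | cons y ys ih =>
    simp only [List.foldl_cons, ih, List.mem_cons]
    by_cases h : g = y <;> simp [h]

-- A's outer while loop computes 'some element's image escapes the list'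
theorem outerLoop_eq (p : Int → Bool) (l : List Int) (b : Bool) :
    l.foldl (fun r x => if p x then true else r) b = (b || l.any p) := by
  induction l generalizing b with
  | nil => simp
  | cons x xs ih =>
    simp only [List.foldl_cons, ih, List.any_cons]
    by_cases h : p x <;> simp [h]

theorem testG_any (lista : List Int) (n : Int) (original : Int) :
    TestG lista n original
      = lista.any (fun x => !(decide (PySem.Int.mod (n * x) original ∈ lista))) := by
  unfold TestG
  rw [show (fun (result : Bool) (x : Int) =>
      let g := PySem.Int.mod (n * x) original
      let f := lista.foldl (fun f y => if g = y then true else f) false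
      if f = false then true else result)
    = (fun result x => if !(decide (PySem.Int.mod (n * x) original ∈ lista)) then true else result) by
      funext r x
      simp only [innerLoop_eq, Bool.false_or]
      by_cases h : PySem.Int.mod (n * x) original ∈ lista <;> simp [h]]
  rw [outerLoop_eq]
  simp

-- binary search over a strictly increasing list finds exactly the values at an index in [lo, hi)
theorem bsearchB_eq (a : List Int) (hs : a.Pairwise (· < ·)) (v : Int) :
    ∀ (k lo hi : Nat), hi - lo ≤ k → hi ≤ a.length →
      (bsearchB a v lo hi = true ↔ ∃ i, lo ≤ i ∧ i < hi ∧ ∃ h : i < a.length, a[i] = v) := by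
  intro k
  induction k with
  | zero =>
    intro lo hi hk hhi
    rw [bsearchB, dif_neg (by omega : ¬ lo < hi)]
    simp only [Bool.false_eq_true, false_iff]
    rintro ⟨i, h1, h2, _, _⟩
    omega
  | succ k ih =>
    intro lo hi hk hhi
    rw [bsearchB]
    by_cases hlh : lo < hi
    · rw [dif_pos hlh]
      have hmono := List.pairwise_iff_getElem.mp hs
      show (if a.getD ((lo + hi) / 2) 0 < v then bsearchB a v ((lo + hi) / 2 + 1) hi
            else if v < a.getD ((lo + hi) / 2) 0 then bsearchB a v lo ((lo + hi) / 2) else true)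
              = true ↔ ∃ i, lo ≤ i ∧ i < hi ∧ ∃ h : i < a.length, a[i] = v
      set mid := (lo + hi) / 2 with hmid
      have hm : mid < a.length := by omega
      rw [List.getD_eq_getElem a 0 hm]
      by_cases h1 : a[mid] < v
      · rw [if_pos h1, ih (mid + 1) hi (by omega) hhi]
        constructor
        · rintro ⟨i, h2, h3, h4, h5⟩; exact ⟨i, by omega, h3, h4, h5⟩
        · rintro ⟨i, h2, h3, h4, h5⟩
          refine ⟨i, ?_, h3, h4, h5⟩
          by_contra hc
          have hle : a[i] ≤ a[mid] := by
            rcases Nat.lt_or_ge i mid with hlt | hge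
            · exact le_of_lt (hmono i mid h4 hm hlt)
            · have hieq : i = mid := by omega
              simp [hieq]
          omega
      · rw [if_neg h1]
        by_cases h2 : v < a[mid]
        · rw [if_pos h2, ih lo mid (by omega) (by omega)]
          constructor
          · rintro ⟨i, h3, h4, h5, h6⟩; exact ⟨i, h3, by omega, h5, h6⟩
          · rintro ⟨i, h3, h4, h5, h6⟩
            refine ⟨i, h3, ?_, h5, h6⟩
            by_contra hc
            have hge2 : a[mid] ≤ a[i] := by
              rcases Nat.lt_or_ge mid i with hlt | hge
              · exact le_of_lt (hmono mid i hm h5 hlt)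
              · have hieq : i = mid := by omega
                simp [hieq]
            omega
        · rw [if_neg h2]
          have heq : a[mid] = v := by omega
          exact ⟨fun _ => ⟨mid, by omega, by omega, hm, heq⟩, fun _ => rfl⟩
    · rw [dif_neg hlh]
      simp only [Bool.false_eq_true, false_iff]
      rintro ⟨i, hh1, hh2, _, _⟩
      omega

theorem bsearchB_mem (a : List Int) (hs : a.Pairwise (· < ·)) (v : Int) :
    bsearchB a v 0 a.length = decide (v ∈ a) := by
  have h := bsearchB_eq a hs v a.length 0 a.length (by omega) le_rfl
  by_cases hv : v ∈ a
  · obtain ⟨i, hi, rfl⟩ := List.getElem_of_mem hv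
    simp only [hv, decide_true]
    exact h.mpr ⟨i, Nat.zero_le _, hi, hi, rfl⟩
  · simp only [hv, decide_false]
    rcases hb : bsearchB a v 0 a.length with _ | _
    · rfl
    · obtain ⟨i, _, _, hil, hiv⟩ := h.mp hb
      exact absurd (hiv ▸ a.getElem_mem hil) hv

theorem loopB_eq_any (srt : List Int) (n original : Int) (l : List Int) :
    loopB srt n original l
      = l.any (fun x => !(bsearchB srt (PySem.Int.mod (n * x) original) 0 srt.length)) := by
  induction l with
  | nil => rfl
  | cons x xs ih =>
    rw [loopB, List.any_cons, ih]
    by_cases h : bsearchB srt (PySem.Int.mod (n * x) original) 0 srt.length <;> simp [h]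

-- ===== VERDICT =====
theorem TestG_spec : Claim_equal_TestG := by
  intro lista n original _ _
  unfold Spec_TestG TestG_alt
  rw [testG_any, loopB_eq_any]
  congr 1
  funext x
  rw [bsearchB_mem _ (PySem.List.sorted_ofList_pairwise_lt lista) _]
  congr 1
  simp [PySem.List.mem_sorted, PySem.Set.mem_ofList]
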